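-- pv_equiv track=rewrite | github.com/poong92/pruviq | backend/research/framework.py | conflicts
-- ===== SOURCE A (Python) =====
-- STRATEGY_GROUPS = {
--     "squeeze": {"bb-squeeze-short", "bb-squeeze-long", "hv-squeeze", "keltner-squeeze"},
--     "trend": {"macd-cross", "supertrend", "ma-cross", "adx-trend", "ichimoku"},
--     "reversal": {"rsi-divergence", "mean-reversion", "stochastic-rsi"},
--     "breakout": {"momentum-long", "atr-breakout", "donchian-breakout", "heikin-ashi"},
-- }
--
-- def conflicts(a_strategy, a_direction, b_strategy, b_direction) -> bool:
--     """Check if two strategy+direction pairs conflict (redundant or cancel out)."""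
--     base_a = a_strategy.replace("-short", "").replace("-long", "")
--     base_b = b_strategy.replace("-short", "").replace("-long", "")
--
--     # Same base strategy, opposite direction = cancel
--     if base_a == base_b and a_direction != b_direction:
--         return True
--
--     # Same group, same direction = redundant
--     for group_strats in STRATEGY_GROUPS.values():
--         if a_strategy in group_strats and b_strategy in group_strats:
--             if a_direction == b_direction:
--                 return True
--
--     return False
-- ===== SOURCE B (Python) =====
-- STRATEGY_GROUPS = {
--     "squeeze": {"bb-squeeze-short", "bb-squeeze-long", "hv-squeeze", "keltner-squeeze"},
--     "trend": {"macd-cross", "supertrend", "ma-cross", "adx-trend", "ichimoku"},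
--     "reversal": {"rsi-divergence", "mean-reversion", "stochastic-rsi"},
--     "breakout": {"momentum-long", "atr-breakout", "donchian-breakout", "heikin-ashi"},
-- }
--
-- # The whole same-group relation, materialised once as a set of ordered pairs.
-- SAME_GROUP_PAIRS = frozenset(
--     (x, y) for strats in STRATEGY_GROUPS.values() for x in strats for y in strats
-- )
--
--
-- def conflicts(a_strategy, a_direction, b_strategy, b_direction) -> bool:
--     """Check if two strategy+direction pairs conflict (redundant or cancel out)."""
--     if a_direction == b_direction:
--         # Same direction: the only possible conflict is redundancy (same group).
--         return (a_strategy, b_strategy) in SAME_GROUP_PAIRS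
--     # Opposite direction: the only possible conflict is cancellation (same base).
--     base_a = a_strategy.replace("-short", "").replace("-long", "")
--     base_b = b_strategy.replace("-short", "").replace("-long", "")
--     return base_a == base_b
-- ===== Notes on version B (the rewrite author's own statement) =====
-- stated objective: alternative
-- what changed: B branches on direction equality first and replaces A's per-call scan over the group sets by one membership test in a materialised set of all same-group strategy pairs; the base-name cancel check is only computed on the opposite-direction branch.
import Mathlib
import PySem

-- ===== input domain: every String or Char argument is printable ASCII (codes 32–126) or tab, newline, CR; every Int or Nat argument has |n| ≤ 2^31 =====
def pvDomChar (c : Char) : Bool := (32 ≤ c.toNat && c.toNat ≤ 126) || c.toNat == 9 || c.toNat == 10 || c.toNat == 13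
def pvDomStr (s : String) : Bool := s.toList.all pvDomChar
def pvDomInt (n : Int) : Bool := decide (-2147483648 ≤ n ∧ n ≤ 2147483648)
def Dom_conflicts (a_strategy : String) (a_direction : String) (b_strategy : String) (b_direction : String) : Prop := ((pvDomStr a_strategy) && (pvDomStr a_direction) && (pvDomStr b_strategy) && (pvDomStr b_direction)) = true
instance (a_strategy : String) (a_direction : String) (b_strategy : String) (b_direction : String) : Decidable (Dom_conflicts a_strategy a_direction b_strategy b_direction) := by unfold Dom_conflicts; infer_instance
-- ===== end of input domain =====

-- B branches on direction equality first and tests one materialised set of all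
-- same-group strategy pairs instead of scanning the group sets (objective: alternative).

-- STRATEGY_GROUPS: the four groups' strategy lists (shared constant of both sources)
def pvGroupLists : List (List String) :=
  [["bb-squeeze-short", "bb-squeeze-long", "hv-squeeze", "keltner-squeeze"],
   ["macd-cross", "supertrend", "ma-cross", "adx-trend", "ichimoku"],
   ["rsi-divergence", "mean-reversion", "stochastic-rsi"],
   ["momentum-long", "atr-breakout", "donchian-breakout", "heikin-ashi"]]

-- ===== PORT A =====
-- STRATEGY_GROUPS.values(): the four group sets (only membership is consumed)
def pvGroupsA : List (PySem.Set String) := pvGroupLists.map PySem.Set.ofList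

-- the 'for group_strats in STRATEGY_GROUPS.values(): …' loop (early return on True)
def pvLoopA (a_strategy b_strategy a_direction b_direction : String) : List (PySem.Set String) → Bool
  | [] => false
  | g :: gs =>
    if PySem.Set.contains g a_strategy && PySem.Set.contains g b_strategy then
      if a_direction == b_direction then true
      else pvLoopA a_strategy b_strategy a_direction b_direction gs
    else pvLoopA a_strategy b_strategy a_direction b_direction gs

def conflicts (a_strategy : String) (a_direction : String) (b_strategy : String) (b_direction : String) : Bool :=
  let base_a := PySem.Str.replace (PySem.Str.replace a_strategy "-short" "") "-long" ""
  let base_b := PySem.Str.replace (PySem.Str.replace b_strategy "-short" "") "-long" ""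
  if base_a == base_b && !(a_direction == b_direction) then true
  else pvLoopA a_strategy b_strategy a_direction b_direction pvGroupsA

-- ===== PORT B =====
-- SAME_GROUP_PAIRS: set comprehension over the groups (a frozenset; only membership is consumed)
def pvPairsB : PySem.Set (String × String) :=
  PySem.Set.ofList (pvGroupLists.flatMap fun g => g.flatMap fun x => g.map fun y => (x, y))

def conflicts_alt (a_strategy : String) (a_direction : String) (b_strategy : String) (b_direction : String) : Bool :=
  if a_direction == b_direction then
    PySem.Set.contains pvPairsB (a_strategy, b_strategy)
  else
    let base_a := PySem.Str.replace (PySem.Str.replace a_strategy "-short" "") "-long" ""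
    let base_b := PySem.Str.replace (PySem.Str.replace b_strategy "-short" "") "-long" ""
    base_a == base_b

-- ===== PRECONDITION & SPEC =====
def Spec_conflicts (a_strategy : String) (a_direction : String) (b_strategy : String) (b_direction : String) (out : Bool) : Prop := out = conflicts_alt a_strategy a_direction b_strategy b_direction
instance (a_strategy : String) (a_direction : String) (b_strategy : String) (b_direction : String) (out : Bool) : Decidable (Spec_conflicts a_strategy a_direction b_strategy b_direction out) := by unfold Spec_conflicts; infer_instance

-- ===== CLAIM (what is proved, stated in full; the proofs are below) =====
def Claim_equal_conflicts : Prop := ∀ (a_strategy : String) (a_direction : String) (b_strategy : String) (b_direction : String), Dom_conflicts a_strategy a_direction b_strategy b_direction → Spec_conflicts a_strategy a_direction b_strategy b_direction (conflicts a_strategy a_direction b_strategy b_direction)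

-- ===== LEMMAS AND PROOFS =====

-- A's loop factors into "some group contains both" and "directions equal"
theorem pvLoopA_eq_any (a b da db : String) (gs : List (PySem.Set String)) :
    pvLoopA a b da db gs =
      ((gs.any fun g => PySem.Set.contains g a && PySem.Set.contains g b) && (da == db)) := by
  induction gs with
  | nil => simp [pvLoopA]
  | cons g gs ih =>
    simp only [pvLoopA, List.any_cons]
    cases h1 : PySem.Set.contains g a <;> cases h2 : PySem.Set.contains g b <;>
      cases hd : (da == db) <;> simp [hd, ih]

-- the pair set tests exactly "some group contains both"
theorem pvContains_pairs (a b : String) :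
    PySem.Set.contains pvPairsB (a, b) =
      (pvGroupsA.any fun g => PySem.Set.contains g a && PySem.Set.contains g b) := by
  have h1 : PySem.Set.contains pvPairsB (a, b) = true ↔
      ∃ g ∈ pvGroupLists, a ∈ g ∧ b ∈ g := by
    rw [PySem.Set.contains_iff]
    unfold pvPairsB
    rw [PySem.Set.mem_ofList]
    simp only [List.mem_flatMap, List.mem_map, Prod.mk.injEq]
    constructor
    · rintro ⟨g, hg, x, hx, y, hy, rfl, rfl⟩; exact ⟨g, hg, hx, hy⟩
    · rintro ⟨g, hg, ha, hb⟩; exact ⟨g, hg, a, ha, b, hb, rfl, rfl⟩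
  have h2 : (pvGroupsA.any fun g => PySem.Set.contains g a && PySem.Set.contains g b) = true ↔
      ∃ g ∈ pvGroupLists, a ∈ g ∧ b ∈ g := by
    unfold pvGroupsA
    simp only [List.any_eq_true, List.mem_map, Bool.and_eq_true, PySem.Set.contains_iff]
    constructor
    · rintro ⟨s, ⟨g, hg, rfl⟩, ha, hb⟩
      exact ⟨g, hg, Iff.mp (PySem.Set.mem_ofList _ _) ha, Iff.mp (PySem.Set.mem_ofList _ _) hb⟩
    · rintro ⟨g, hg, ha, hb⟩
      exact ⟨PySem.Set.ofList g, ⟨g, hg, rfl⟩, Iff.mpr (PySem.Set.mem_ofList _ _) ha,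
        Iff.mpr (PySem.Set.mem_ofList _ _) hb⟩
  cases hl : PySem.Set.contains pvPairsB (a, b) <;>
    cases hr : (pvGroupsA.any fun g => PySem.Set.contains g a && PySem.Set.contains g b)
  · rfl
  · have h := h1.mpr (h2.mp hr); rw [hl] at h; exact h
  · have h := h2.mpr (h1.mp hl); rw [hr] at h; exact h.symm
  · rfl

-- ===== VERDICT (by name: the statement is the Claim_ definition above) =====
theorem conflicts_spec : Claim_equal_conflicts := by
  intro a da b db _
  unfold Spec_conflicts conflicts conflicts_alt
  simp only [pvLoopA_eq_any, ← pvContains_pairs]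
  cases hd : (da == db) <;> simp [BEq.beq]
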